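-- pv_equiv track=rewrite | github.com/rntk/txt-map | lib/txt_splitt/splitters.py | _merge_boundaries
-- ===== SOURCE A (Python) =====
-- def _merge_boundaries(
--     regex_boundaries: list[tuple[int, int]],
--     block_positions: list[int],
-- ) -> list[tuple[int, int]]:
--     """Merge regex boundary ranges with block-element boundary positions.
--
--     Block positions become zero-width ``(pos, pos)`` boundaries.  Positions
--     already covered by a regex boundary are dropped.
--     """
--     merged: list[tuple[int, int]] = list(regex_boundaries)
--     for pos in block_positions:
--         covered = any(b_start <= pos <= b_end for b_start, b_end in regex_boundaries)
--         if not covered: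
--             merged.append((pos, pos))
--     merged.sort()
--     return merged
-- ===== SOURCE B (Python) =====
-- # B: merge the regex intervals once (sort by start + sweep), then binary-search each
-- # block position for coverage: O((R+B) log R) instead of A's O(B*R) scan per position.
-- from bisect import bisect_right
--
--
-- def _merge_boundaries(
--     regex_boundaries: list[tuple[int, int]],
--     block_positions: list[int],
-- ) -> list[tuple[int, int]]:
--     ivs = sorted((b for b in regex_boundaries if b[0] <= b[1]), key=lambda b: b[0])
--     merged: list[tuple[int, int]] = []
--     cur = None
--     for s, e in ivs:
--         if cur is None:
--             cur = (s, e)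
--         elif s <= cur[1]:
--             if e > cur[1]:
--                 cur = (cur[0], e)
--         else:
--             merged.append(cur)
--             cur = (s, e)
--     if cur is not None:
--         merged.append(cur)
--     starts = [s for s, _ in merged]
--     ends = [e for _, e in merged]
--     out = list(regex_boundaries)
--     for pos in block_positions:
--         i = bisect_right(starts, pos)
--         if i == 0 or ends[i - 1] < pos:
--             out.append((pos, pos))
--     out.sort()
--     return out
-- ===== Notes on version B (the rewrite author's own statement) =====
-- stated objective: faster
-- what changed: Instead of scanning all regex boundaries for every block position, B sorts and merges the (non-empty) regex intervals once into a disjoint chain and binary-searches each position for coverage.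
import Mathlib
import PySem

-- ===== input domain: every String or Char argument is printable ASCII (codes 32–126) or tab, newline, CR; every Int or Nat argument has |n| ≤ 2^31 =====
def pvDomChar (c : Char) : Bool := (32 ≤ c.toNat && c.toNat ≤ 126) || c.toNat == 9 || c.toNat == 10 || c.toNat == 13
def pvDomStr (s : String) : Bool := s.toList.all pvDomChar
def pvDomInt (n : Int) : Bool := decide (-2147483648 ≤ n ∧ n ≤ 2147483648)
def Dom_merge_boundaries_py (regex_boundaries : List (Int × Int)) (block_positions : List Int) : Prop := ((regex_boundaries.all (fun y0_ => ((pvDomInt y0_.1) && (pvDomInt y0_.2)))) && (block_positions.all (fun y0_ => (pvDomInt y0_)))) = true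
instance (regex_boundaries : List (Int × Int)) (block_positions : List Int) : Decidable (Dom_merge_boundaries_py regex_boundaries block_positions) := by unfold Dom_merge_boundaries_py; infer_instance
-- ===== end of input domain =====

-- B merges the regex intervals once and binary-searches each block position for coverage
-- instead of A's full scan of regex_boundaries per position; return values agree everywhere
-- (neither program observably mutates its arguments).

-- ===== PORT A =====
def merge_boundaries_py (regex_boundaries : List (Int × Int)) (block_positions : List Int) : List (Int × Int) :=
  let merged := block_positions.foldl
    (fun m pos =>
      let covered := regex_boundaries.any (fun b => decide (b.1 ≤ pos) && decide (pos ≤ b.2))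
      if covered then m else m ++ [(pos, pos)])
    regex_boundaries
  PySem.List.sorted2 merged (fun b => b.1) (fun b => b.2)   -- merged.sort(): tuples compare lexicographically

-- ===== PORT B =====
-- the 'for s, e in ivs' sweep of Source B: state = (emitted list, current open interval or None)
def pvMStep (st : List (Int × Int) × Option (Int × Int)) (b : Int × Int) : List (Int × Int) × Option (Int × Int) :=
  match st.2 with
  | none => (st.1, some b)
  | some c =>
    if b.1 ≤ c.2 then
      (if c.2 < b.2 then (st.1, some (c.1, b.2)) else st)
    else (st.1 ++ [c], some b)

def pvMergeIvs (ivs : List (Int × Int)) : List (Int × Int) :=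
  let st := ivs.foldl pvMStep ([], none)
  match st.2 with
  | none => st.1
  | some c => st.1 ++ [c]

def merge_boundaries_py_alt (regex_boundaries : List (Int × Int)) (block_positions : List Int) : List (Int × Int) :=
  let ivs := PySem.List.sorted (regex_boundaries.filter (fun b => decide (b.1 ≤ b.2))) (fun b => b.1)
  let merged := pvMergeIvs ivs
  let starts := merged.map (fun b => b.1)
  let ends := merged.map (fun b => b.2)
  let out := block_positions.foldl
    (fun o pos =>
      let i := PySem.List.bisectRight starts pos
      -- ends[i-1]: in Python the index is only evaluated when i ≥ 1, and bisect_right ≤ len,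
      -- so the access is always in range; getD's default is never used.
      if i = 0 ∨ ends.getD (i - 1) 0 < pos then o ++ [(pos, pos)] else o)
    regex_boundaries
  PySem.List.sorted2 out (fun b => b.1) (fun b => b.2)

-- ===== PRECONDITION & SPEC =====
def Spec_merge_boundaries_py (regex_boundaries : List (Int × Int)) (block_positions : List Int) (out : List (Int × Int)) : Prop := out = merge_boundaries_py_alt regex_boundaries block_positions
instance (regex_boundaries : List (Int × Int)) (block_positions : List Int) (out : List (Int × Int)) : Decidable (Spec_merge_boundaries_py regex_boundaries block_positions out) := by unfold Spec_merge_boundaries_py; infer_instance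

-- ===== CLAIM (what is proved, stated in full; the proofs are below) =====
def Claim_equal_merge_boundaries_py : Prop := ∀ (regex_boundaries : List (Int × Int)) (block_positions : List Int), Dom_merge_boundaries_py regex_boundaries block_positions → Spec_merge_boundaries_py regex_boundaries block_positions (merge_boundaries_py regex_boundaries block_positions)

-- ===== LEMMAS AND PROOFS =====

-- 'pos is covered by some interval of L'
def Cov (L : List (Int × Int)) (pos : Int) : Prop := ∃ b ∈ L, b.1 ≤ pos ∧ pos ≤ b.2

theorem cov_filter (R : List (Int × Int)) (pos : Int) :
    Cov (R.filter (fun b => decide (b.1 ≤ b.2))) pos ↔ Cov R pos := by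
  simp only [Cov, List.mem_filter]
  constructor
  · rintro ⟨b, ⟨hb, _⟩, h⟩; exact ⟨b, hb, h⟩
  · rintro ⟨b, hb, h1, h2⟩; exact ⟨b, ⟨hb, by simp; omega⟩, h1, h2⟩

theorem cov_perm {L L' : List (Int × Int)} (h : L.Perm L') (pos : Int) :
    Cov L pos ↔ Cov L' pos := by
  simp only [Cov]
  constructor <;> rintro ⟨b, hb, h1, h2⟩
  · exact ⟨b, h.mem_iff.mp hb, h1, h2⟩
  · exact ⟨b, h.mem_iff.mpr hb, h1, h2⟩

-- the sweep-loop invariant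
theorem merge_loop (l : List (Int × Int)) :
    ∀ (done : List (Int × Int)) (c : Int × Int),
    l.Pairwise (fun a b => a.1 ≤ b.1) →
    (∀ b ∈ l, b.1 ≤ b.2) →
    (∀ b ∈ l, c.1 ≤ b.1) →
    c.1 ≤ c.2 →
    done.Pairwise (fun a b => a.2 < b.1) →
    (∀ b ∈ done, b.1 ≤ b.2) →
    (∀ b ∈ done, b.2 < c.1) →
    ∃ done' c', l.foldl pvMStep (done, some c) = (done', some c') ∧
      (done' ++ [c']).Pairwise (fun a b => a.2 < b.1) ∧
      (∀ b ∈ done' ++ [c'], b.1 ≤ b.2) ∧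
      (∀ pos, Cov (done' ++ [c']) pos ↔ Cov (done ++ c :: l) pos) := by
  induction l with
  | nil =>
    intro done c _ _ _ hc hdone hvd hdc
    refine ⟨done, c, rfl, ?_, ?_, fun pos => Iff.rfl⟩
    · rw [List.pairwise_append]
      exact ⟨hdone, by simp, by intro a ha b hb; simp at hb; subst hb; exact hdc a ha⟩
    · intro b hb; rcases List.mem_append.mp hb with h | h
      · exact hvd b h
      · simp at h; subst h; exact hc
  | cons b t ih =>
    intro done c hl hvl hlc hc hdone hvd hdc
    have hb1 : c.1 ≤ b.1 := hlc b (by simp)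
    have hb12 : b.1 ≤ b.2 := hvl b (by simp)
    have hlt : t.Pairwise (fun a b => a.1 ≤ b.1) := hl.of_cons
    have hblt : ∀ x ∈ t, b.1 ≤ x.1 := by
      intro x hx; exact (List.pairwise_cons.mp hl).1 x hx
    simp only [List.foldl_cons]
    by_cases h1 : b.1 ≤ c.2
    · by_cases h2 : c.2 < b.2
      · -- extend current interval to (c.1, b.2)
        have hstep : pvMStep (done, some c) b = (done, some (c.1, b.2)) := by
          simp [pvMStep, h1, h2]
        rw [hstep]
        obtain ⟨done', c', heq, hp, hv, hcov⟩ :=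
          ih done (c.1, b.2) hlt (fun x hx => hvl x (by simp [hx]))
            (fun x hx => hlc x (by simp [hx])) (by simp; omega) hdone hvd hdc
        refine ⟨done', c', heq, hp, hv, fun pos => ?_⟩
        rw [hcov pos]
        simp only [Cov, List.mem_append, List.mem_cons]
        constructor
        · rintro ⟨x, hx, hx1, hx2⟩
          rcases hx with h | h | h
          · exact ⟨x, Or.inl h, hx1, hx2⟩
          · subst h; simp at hx1 hx2
            by_cases hpc : pos ≤ c.2
            · exact ⟨c, Or.inr (Or.inl rfl), hx1, hpc⟩
            · exact ⟨b, Or.inr (Or.inr (Or.inl rfl)), by omega, hx2⟩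
          · exact ⟨x, Or.inr (Or.inr (Or.inr h)), hx1, hx2⟩
        · rintro ⟨x, hx, hx1, hx2⟩
          rcases hx with h | h | h | h
          · exact ⟨x, Or.inl h, hx1, hx2⟩
          · rw [h] at hx1 hx2; exact ⟨(c.1, b.2), Or.inr (Or.inl rfl), by simp; omega, by simp; omega⟩
          · rw [h] at hx1 hx2; exact ⟨(c.1, b.2), Or.inr (Or.inl rfl), by simp; omega, by simp; omega⟩
          · exact ⟨x, Or.inr (Or.inr h), hx1, hx2⟩
      · -- b is contained in c: drop it
        have hstep : pvMStep (done, some c) b = (done, some c) := by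
          simp [pvMStep, h1, h2]
        rw [hstep]
        obtain ⟨done', c', heq, hp, hv, hcov⟩ :=
          ih done c hlt (fun x hx => hvl x (by simp [hx]))
            (fun x hx => hlc x (by simp [hx])) hc hdone hvd hdc
        refine ⟨done', c', heq, hp, hv, fun pos => ?_⟩
        rw [hcov pos]
        simp only [Cov, List.mem_append, List.mem_cons]
        constructor
        · rintro ⟨x, hx, hx1, hx2⟩
          rcases hx with h | h | h
          · exact ⟨x, Or.inl h, hx1, hx2⟩
          · exact ⟨x, Or.inr (Or.inl h), hx1, hx2⟩
          · exact ⟨x, Or.inr (Or.inr (Or.inr h)), hx1, hx2⟩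
        · rintro ⟨x, hx, hx1, hx2⟩
          rcases hx with h | h | h | h
          · exact ⟨x, Or.inl h, hx1, hx2⟩
          · exact ⟨x, Or.inr (Or.inl h), hx1, hx2⟩
          · subst h; exact ⟨c, Or.inr (Or.inl rfl), by omega, by omega⟩
          · exact ⟨x, Or.inr (Or.inr h), hx1, hx2⟩
    · -- gap: emit c, open b
      have hstep : pvMStep (done, some c) b = (done ++ [c], some b) := by
        simp [pvMStep, h1]
      rw [hstep]
      have hdone' : (done ++ [c]).Pairwise (fun a b => a.2 < b.1) := by
        rw [List.pairwise_append]
        exact ⟨hdone, by simp, by intro a ha x hx; simp at hx; subst hx; exact hdc a ha⟩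
      obtain ⟨done', c', heq, hp, hv, hcov⟩ :=
        ih (done ++ [c]) b hlt (fun x hx => hvl x (by simp [hx])) hblt hb12 hdone'
          (by intro x hx; rcases List.mem_append.mp hx with h | h
              · exact hvd x h
              · simp at h; subst h; exact hc)
          (by intro x hx; rcases List.mem_append.mp hx with h | h
              · have := hdc x h; omega
              · simp at h; subst h; omega)
      refine ⟨done', c', heq, hp, hv, fun pos => ?_⟩
      rw [hcov pos]
      simp only [Cov, List.mem_append, List.mem_cons]
      constructor <;> rintro ⟨x, hx, hx1, hx2⟩ <;> exact ⟨x, by tauto, hx1, hx2⟩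

-- the merged list: a valid separated chain covering exactly what ivs covers
theorem mergeIvs_props (ivs : List (Int × Int))
    (hs : ivs.Pairwise (fun a b => a.1 ≤ b.1)) (hv : ∀ b ∈ ivs, b.1 ≤ b.2) :
    (pvMergeIvs ivs).Pairwise (fun a b => a.2 < b.1) ∧
    (∀ b ∈ pvMergeIvs ivs, b.1 ≤ b.2) ∧
    (∀ pos, Cov (pvMergeIvs ivs) pos ↔ Cov ivs pos) := by
  cases ivs with
  | nil => exact ⟨by simp [pvMergeIvs], by simp [pvMergeIvs], by simp [pvMergeIvs]⟩
  | cons b t =>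
    have hstep : pvMStep ([], none) b = ([], some b) := by simp [pvMStep]
    obtain ⟨done', c', heq, hp, hvv, hcov⟩ :=
      merge_loop t [] b hs.of_cons (fun x hx => hv x (by simp [hx]))
        (fun x hx => (List.pairwise_cons.mp hs).1 x hx) (hv b (by simp))
        (by simp) (by simp) (by simp)
    have : pvMergeIvs (b :: t) = done' ++ [c'] := by
      simp only [pvMergeIvs, List.foldl_cons, hstep, heq]
    rw [this]
    exact ⟨hp, hvv, fun pos => by rw [hcov pos]; simp [Cov]⟩

-- coverage test via bisect on a separated chain
theorem bisect_cov (M : List (Int × Int)) (pos : Int)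
    (hp : M.Pairwise (fun a b => a.2 < b.1)) (hv : ∀ b ∈ M, b.1 ≤ b.2) :
    (¬ (PySem.List.bisectRight (M.map (fun b => b.1)) pos = 0 ∨
        (M.map (fun b => b.2)).getD (PySem.List.bisectRight (M.map (fun b => b.1)) pos - 1) 0 < pos))
    ↔ Cov M pos := by
  set starts := M.map (fun b => b.1) with hst
  have hsorted : starts.Pairwise (· ≤ ·) := by
    rw [hst, List.pairwise_map]
    refine hp.imp_of_mem ?_
    intro a b ha hb h
    have := hv a ha; omega
  obtain ⟨hle, hlt', hgt⟩ := PySem.List.bisectRight_spec starts pos hsorted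
  set i := PySem.List.bisectRight starts pos with hi
  have hlen : starts.length = M.length := by simp [hst]
  constructor
  · intro h
    push Not at h
    obtain ⟨h0, h2⟩ := h
    have hi1 : i - 1 < M.length := by omega
    have hs1 : starts[i-1]'(by omega) ≤ pos := hlt' (i-1) (by omega) (by omega)
    have hget : (M.map (fun b => b.2)).getD (i - 1) 0 = (M[i-1]'hi1).2 := by
      rw [List.getD_eq_getElem?_getD, List.getElem?_map, List.getElem?_eq_getElem hi1]
      simp
    rw [hget] at h2
    refine ⟨M[i-1]'hi1, List.getElem_mem hi1, ?_, by omega⟩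
    have : starts[i-1]'(by omega) = (M[i-1]'hi1).1 := by
      simp [hst]
    omega
  · rintro ⟨b, hb, hb1, hb2⟩
    obtain ⟨j, hj, hbj⟩ := List.getElem_of_mem hb
    have hsj : starts[j]'(by omega) = b.1 := by simp [hst, hbj]
    have hjlt : j < i := by
      by_contra hcon
      have := hgt j (by omega) (by omega)
      omega
    have h0 : i ≠ 0 := by omega
    have hi1 : i - 1 < M.length := by omega
    have hget : (M.map (fun b => b.2)).getD (i - 1) 0 = (M[i-1]'hi1).2 := by
      rw [List.getD_eq_getElem?_getD, List.getElem?_map, List.getElem?_eq_getElem hi1]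
      simp
    -- the covering interval must be the last one starting ≤ pos
    have hj_eq : j = i - 1 := by
      by_contra hne
      have hjlt' : j < i - 1 := by omega
      have hs1 : starts[i-1]'(by omega) ≤ pos := hlt' (i-1) (by omega) (by omega)
      have hsep : (M[j]'hj).2 < (M[i-1]'hi1).1 :=
        List.pairwise_iff_getElem.mp hp j (i-1) hj hi1 hjlt'
      have : starts[i-1]'(by omega) = (M[i-1]'hi1).1 := by simp [hst]
      rw [hbj] at hsep
      omega
    subst hj_eq
    push Not
    refine ⟨h0, ?_⟩
    rw [hget, hbj]
    omega

-- pointwise equality of the two append conditions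
theorem cond_eq (R : List (Int × Int)) (pos : Int) :
    (let ivs := PySem.List.sorted (R.filter (fun b => decide (b.1 ≤ b.2))) (fun b => b.1)
     let merged := pvMergeIvs ivs
     decide (PySem.List.bisectRight (merged.map (fun b => b.1)) pos = 0 ∨
        (merged.map (fun b => b.2)).getD (PySem.List.bisectRight (merged.map (fun b => b.1)) pos - 1) 0 < pos))
    = !(R.any (fun b => decide (b.1 ≤ pos) && decide (pos ≤ b.2))) := by
  set F := R.filter (fun b => decide (b.1 ≤ b.2)) with hF
  set ivs := PySem.List.sorted F (fun b => b.1) with hivs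
  have hperm : ivs.Perm F := PySem.List.sorted_perm F (fun b => b.1) false
  have hsorted : ivs.Pairwise (fun a b => a.1 ≤ b.1) :=
    PySem.List.sorted_pairwise F (fun b => b.1)
  have hvalid : ∀ b ∈ ivs, b.1 ≤ b.2 := by
    intro b hb
    have : b ∈ F := hperm.mem_iff.mp hb
    rw [hF] at this
    have := (List.mem_filter.mp this).2
    simpa using this
  obtain ⟨hp, hv, hcov⟩ := mergeIvs_props ivs hsorted hvalid
  have hchain : Cov (pvMergeIvs ivs) pos ↔ Cov R pos := by
    rw [hcov pos, cov_perm hperm pos, hF, cov_filter]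
  have hany : (R.any (fun b => decide (b.1 ≤ pos) && decide (pos ≤ b.2))) = true ↔ Cov R pos := by
    simp [Cov, List.any_eq_true]
  have hb := bisect_cov (pvMergeIvs ivs) pos hp hv
  by_cases hcv : Cov R pos
  · have := (hchain.mpr hcv)
    have hcond := hb.mpr this
    simp only [decide_eq_false hcond, hany.mpr hcv]
    rfl
  · have hnot : ¬ Cov (pvMergeIvs ivs) pos := fun h => hcv (hchain.mp h)
    have hcond : (PySem.List.bisectRight ((pvMergeIvs ivs).map (fun b => b.1)) pos = 0 ∨
        ((pvMergeIvs ivs).map (fun b => b.2)).getD (PySem.List.bisectRight ((pvMergeIvs ivs).map (fun b => b.1)) pos - 1) 0 < pos) := by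
      by_contra h; exact hnot (hb.mp h)
    have hanyf : (R.any (fun b => decide (b.1 ≤ pos) && decide (pos ≤ b.2))) = false := by
      rw [← Bool.not_eq_true]; intro h; exact hcv (hany.mp h)
    simp only [decide_eq_true hcond, hanyf]
    rfl

-- ===== VERDICT (by name: the statement is the Claim_ definition above) =====
theorem merge_boundaries_py_spec : Claim_equal_merge_boundaries_py := by
  intro R P _
  unfold Spec_merge_boundaries_py merge_boundaries_py merge_boundaries_py_alt
  dsimp only
  have hA : (fun (m : List (Int × Int)) (pos : Int) =>
        if (R.any fun b => decide (b.1 ≤ pos) && decide (pos ≤ b.2)) = true then m else m ++ [(pos, pos)])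
      = (fun (m : List (Int × Int)) (pos : Int) =>
        if (!(R.any fun b => decide (b.1 ≤ pos) && decide (pos ≤ b.2))) = true then m ++ [(pos, pos)] else m) := by
    funext m pos
    cases R.any fun b => decide (b.1 ≤ pos) && decide (pos ≤ b.2) <;> simp
  rw [hA]
  rw [PySem.List.foldl_append_if
        (p := fun pos => !(R.any fun b => decide (b.1 ≤ pos) && decide (pos ≤ b.2)))
        (f := fun pos => ((pos : Int), (pos : Int)))]
  rw [PySem.List.foldl_append_ite
        (p := fun pos => PySem.List.bisectRight ((pvMergeIvs (PySem.List.sorted (R.filter (fun b => decide (b.1 ≤ b.2))) (fun b => b.1))).map (fun b => b.1)) pos = 0 ∨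
          ((pvMergeIvs (PySem.List.sorted (R.filter (fun b => decide (b.1 ≤ b.2))) (fun b => b.1))).map (fun b => b.2)).getD (PySem.List.bisectRight ((pvMergeIvs (PySem.List.sorted (R.filter (fun b => decide (b.1 ≤ b.2))) (fun b => b.1))).map (fun b => b.1)) pos - 1) 0 < pos)
        (f := fun pos => ((pos : Int), (pos : Int)))]
  have hfilt : P.filter (fun pos => !(R.any fun b => decide (b.1 ≤ pos) && decide (pos ≤ b.2)))
      = P.filter (fun pos => decide (PySem.List.bisectRight ((pvMergeIvs (PySem.List.sorted (R.filter (fun b => decide (b.1 ≤ b.2))) (fun b => b.1))).map (fun b => b.1)) pos = 0 ∨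
          ((pvMergeIvs (PySem.List.sorted (R.filter (fun b => decide (b.1 ≤ b.2))) (fun b => b.1))).map (fun b => b.2)).getD (PySem.List.bisectRight ((pvMergeIvs (PySem.List.sorted (R.filter (fun b => decide (b.1 ≤ b.2))) (fun b => b.1))).map (fun b => b.1)) pos - 1) 0 < pos)) := by
    apply List.filter_congr
    intro pos _
    exact (cond_eq R pos).symm
  rw [hfilt]
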